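-- pv_equiv track=rewrite | github.com/Mortalium/Test | Appl_Quick_Sort_2.py | for_ComparePos
-- ===== SOURCE A (Python) =====
-- def for_ComparePos(List,Pivot,LMin,i):
--     if(i<Pivot):
--         if(List[Pivot]<=List[i]):
--             tmp=List[Pivot]
--             List[Pivot]=List[i]
--             List[i]=tmp
--             Pivot=i
--             LMin=Pivot+1
--             return List,Pivot,LMin
--         else:
--             List,Pivot,LMin=for_ComparePos(List,Pivot,LMin,i+1)
--             return List,Pivot,LMin
--     else:
--         return List,Pivot,LMin
-- ===== SOURCE B (Python) =====
-- def for_ComparePos(List, Pivot, LMin, i):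
--     for j in range(i, Pivot):
--         if List[Pivot] <= List[j]:
--             List[Pivot], List[j] = List[j], List[Pivot]
--             return List, j, j + 1
--     return List, Pivot, LMin
-- ===== Notes on version B (the rewrite author's own statement) =====
-- stated objective: idiomatic
-- what changed: Replaced A's tail recursion on the index with a single iterative for-loop over range(i, Pivot) that swaps and returns at the first qualifying position (find-first scan).
import Mathlib
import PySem

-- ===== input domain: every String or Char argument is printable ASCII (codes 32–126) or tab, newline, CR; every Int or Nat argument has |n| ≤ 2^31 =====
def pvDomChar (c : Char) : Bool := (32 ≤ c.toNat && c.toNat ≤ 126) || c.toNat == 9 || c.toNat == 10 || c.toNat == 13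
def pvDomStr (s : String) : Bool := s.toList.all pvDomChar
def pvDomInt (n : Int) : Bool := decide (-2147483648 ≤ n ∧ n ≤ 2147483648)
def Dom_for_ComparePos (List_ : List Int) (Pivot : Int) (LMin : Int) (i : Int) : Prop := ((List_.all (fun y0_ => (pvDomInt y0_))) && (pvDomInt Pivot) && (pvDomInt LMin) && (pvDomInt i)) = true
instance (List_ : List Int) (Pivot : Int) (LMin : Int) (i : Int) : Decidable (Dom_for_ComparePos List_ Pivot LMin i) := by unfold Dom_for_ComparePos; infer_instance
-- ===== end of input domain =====

-- B replaces A's tail recursion with an iterative find-first scan over range(i, Pivot); same in-place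
-- swap and return values. The equivalence is about the return value (both Pythons mutate List in place
-- identically on the matching branch).

-- ===== PORT A =====
-- literal transliteration of A's recursion; the wildcard match arm is reached only where
-- Python raises IndexError (excluded by Pre_for_ComparePos)
def for_ComparePos (List_ : List Int) (Pivot : Int) (LMin : Int) (i : Int) : List Int × Int × Int :=
  if i < Pivot then
    match PySem.List.pyGet? List_ Pivot, PySem.List.pyGet? List_ i with
    | some vp, some vi =>
      if vp ≤ vi then
        -- tmp = List[Pivot]; List[Pivot] = List[i]; List[i] = tmp
        let L1 := PySem.List.pySetD List_ Pivot vi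
        let L2 := PySem.List.pySetD L1 i vp
        (L2, i, i + 1)
      else for_ComparePos List_ Pivot LMin (i + 1)
    | _, _ => (List_, Pivot, LMin)
  else (List_, Pivot, LMin)
termination_by (Pivot - i).toNat
decreasing_by omega

-- ===== PORT B =====
-- scan the index list range(i, Pivot) for the first qualifying position; none = no hit
-- (the wildcard arm is reached only where Python raises IndexError, excluded by Pre_)
def cpFirstHit (List_ : List Int) (Pivot : Int) (js : List Int) : Option (List Int × Int × Int) :=
  match js with
  | [] => none
  | j :: rest =>
    match PySem.List.pyGet? List_ Pivot with
    | none => none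
    | some vp =>
      match PySem.List.pyGet? List_ j with
      | none => none
      | some vj =>
        if vp ≤ vj then
          -- List[Pivot], List[j] = List[j], List[Pivot]
          some (PySem.List.pySetD (PySem.List.pySetD List_ Pivot vj) j vp, j, j + 1)
        else cpFirstHit List_ Pivot rest

def for_ComparePos_alt (List_ : List Int) (Pivot : Int) (LMin : Int) (i : Int) : List Int × Int × Int :=
  match cpFirstHit List_ Pivot (PySem.List.pyRange i Pivot 1) with
  | some r => r
  | none => (List_, Pivot, LMin)

-- ===== PRECONDITION & SPEC =====
-- Pre_ excludes exactly the inputs where Python A raises IndexError: when the scan runs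
-- (i < Pivot), index Pivot and every scanned index must be valid Python indices.
def Pre_for_ComparePos (List_ : List Int) (Pivot : Int) (LMin : Int) (i : Int) : Prop :=
  i < Pivot → (-(List_.length : Int) ≤ i ∧ Pivot < (List_.length : Int))
instance (List_ : List Int) (Pivot : Int) (LMin : Int) (i : Int) : Decidable (Pre_for_ComparePos List_ Pivot LMin i) := by unfold Pre_for_ComparePos; infer_instance

def pvWitness_for_ComparePos : List Int × Int × Int × Int := ([3, 1, 2], 2, 0, 0)

def Spec_for_ComparePos (List_ : List Int) (Pivot : Int) (LMin : Int) (i : Int) (out : List Int × Int × Int) : Prop := out = for_ComparePos_alt List_ Pivot LMin i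
instance (List_ : List Int) (Pivot : Int) (LMin : Int) (i : Int) (out : List Int × Int × Int) : Decidable (Spec_for_ComparePos List_ Pivot LMin i out) := by unfold Spec_for_ComparePos; infer_instance

-- ===== CLAIM (what is proved, stated in full; the proofs are below) =====
def Claim_equal_for_ComparePos : Prop := ∀ (List_ : List Int) (Pivot : Int) (LMin : Int) (i : Int), Dom_for_ComparePos List_ Pivot LMin i → Pre_for_ComparePos List_ Pivot LMin i → Spec_for_ComparePos List_ Pivot LMin i (for_ComparePos List_ Pivot LMin i)

-- ===== LEMMAS AND PROOFS =====

theorem for_ComparePos_eq_alt (List_ : List Int) (Pivot LMin i : Int) :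
    for_ComparePos List_ Pivot LMin i = for_ComparePos_alt List_ Pivot LMin i := by
  by_cases h : i < Pivot
  · -- induction on the remaining scan length
    have hk : ∃ k : Nat, (Pivot - i).toNat = k := ⟨_, rfl⟩
    obtain ⟨k, hk⟩ := hk
    induction k generalizing i with
    | zero => omega
    | succ k ih =>
      rw [for_ComparePos, if_pos h]
      unfold for_ComparePos_alt
      rw [PySem.List.pyRange_one_cons h]
      unfold cpFirstHit
      cases hp : PySem.List.pyGet? List_ Pivot with
      | none => simp
      | some vp =>
        cases hi : PySem.List.pyGet? List_ i with
        | none => simp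
        | some vi =>
          simp only
          by_cases hle : vp ≤ vi
          · simp [hle]
          · simp only [if_neg hle]
            by_cases h' : i + 1 < Pivot
            · have := ih (i + 1) h' (by omega)
              rw [this]
              unfold for_ComparePos_alt
              rfl
            · have hP : Pivot = i + 1 := by omega
              rw [for_ComparePos, if_neg h']
              have : PySem.List.pyRange (i + 1) Pivot 1 = [] := by
                subst hP
                simp [PySem.List.pyRange]
              rw [this]
              unfold cpFirstHit
              rfl
  · rw [for_ComparePos, if_neg h]
    unfold for_ComparePos_alt
    have : PySem.List.pyRange i Pivot 1 = [] := by
      unfold PySem.List.pyRange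
      simp only [if_pos (by norm_num : (0:Int) < 1)]
      have : (Pivot - i).toNat = 0 := by omega
      simp [this]
    rw [this]
    rfl

-- ===== VERDICT (by name: the statement is the Claim_ definition above) =====
theorem for_ComparePos_spec : Claim_equal_for_ComparePos := by
  intro List_ Pivot LMin i _ _
  unfold Spec_for_ComparePos
  exact for_ComparePos_eq_alt List_ Pivot LMin i
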